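-- pv_equiv track=rewrite | github.com/ghogue02/learning-platform-dashboard | summarize_analyses.py | format_lesson_insights_for_output
-- ===== SOURCE A (Python) =====
-- def format_lesson_insights_for_output(lesson_analyses_data, overall_summary): # overall_summary not used here now
--     """Formats lesson-specific insights for Markdown output. Returns table data."""
--     output_text = "" # No Markdown output in this function anymore - only table data returned
--     lesson_insights_table_data = []
--
--     if lesson_analyses_data:
--         output_text += "### Part 2: PRIORITIZED Lesson-Specific Opportunity Insights for Coaches\n\n" # Markdown for Part 2
--         output_text += "These insights are designed to be concise and immediately actionable for coaches, enhancing their support to students in specific lessons.\n\n"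
--
--         for lesson_analysis in lesson_analyses_data:
--             lesson_title = lesson_analysis['title']
--             analysis_lines = lesson_analysis['analysis'].split('\n')
--             insights = []
--             collect_insights = False
--
--             for line in analysis_lines:
--                 if "Concepts or Topics Students are **Struggling** to Understand:" in line:
--                     collect_insights = True
--                     continue
--                 elif "Concepts or Topics Students Seem to **Understand Well**:" in line:
--                     collect_insights = False
--                     break # Stop collecting after struggles, before good understanding for conciseness
--                 elif collect_insights and line.strip() and not line.startswith("Examples:"): # Capture insights, not examples
--                     insight = line.strip().replace('- ', '').replace('* ', '') # Clean up insight formatting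
--                     if insight: # Only add non-empty insights
--                         insights.append(insight)
--
--             if insights:
--                 lesson_insights_table_data.append({
--                     "Lesson Title": lesson_title,
--                     "Opportunity Insights": "\n".join([f"- {insight}" for insight in insights[:3]]) # Take only first 3 insights and format as bullet points
--                 })
--                 output_text += f"**Lesson Title:** {lesson_title}\n"
--                 output_text += "- **Opportunity Insights:**\n"
--                 for insight in insights[:3]: # Output only the first 3 insights in markdown
--                     output_text += f"  - {insight}\n"
--                 output_text += "\n"
--     else:
--         output_text += "No lesson-specific insights available.\n" # Handle no data case
--
--     return output_text, lesson_insights_table_data # Returns empty Markdown output and table data for Part 2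
-- ===== SOURCE B (Python) =====
-- STRUG = "Concepts or Topics Students are **Struggling** to Understand:"
-- GOOD = "Concepts or Topics Students Seem to **Understand Well**:"
--
-- HEADER = ("### Part 2: PRIORITIZED Lesson-Specific Opportunity Insights for Coaches\n\n"
--           "These insights are designed to be concise and immediately actionable for coaches, "
--           "enhancing their support to students in specific lessons.\n\n")
--
--
-- def _insights(analysis):
--     """First three cleaned struggle lines, found by slicing between the two marker lines."""
--     lines = analysis.split('\n')
--     stop = next((i for i, l in enumerate(lines) if GOOD in l and STRUG not in l), len(lines))
--     prefix = lines[:stop]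
--     start = next((i for i, l in enumerate(prefix) if STRUG in l), None)
--     if start is None:
--         return []
--     body = [l for l in prefix[start + 1:]
--             if STRUG not in l and l.strip() and not l.startswith("Examples:")]
--     cleaned = [l.strip().replace('- ', '').replace('* ', '') for l in body]
--     return [c for c in cleaned if c][:3]
--
--
-- def format_lesson_insights_for_output(lesson_analyses_data, overall_summary):
--     if not lesson_analyses_data:
--         return "No lesson-specific insights available.\n", []
--     table = []
--     blocks = []
--     for lesson in lesson_analyses_data:
--         title = lesson['title']
--         ins = _insights(lesson['analysis'])
--         if ins:
--             table.append({"Lesson Title": title,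
--                           "Opportunity Insights": "\n".join("- " + i for i in ins)})
--             blocks.append("**Lesson Title:** " + title + "\n- **Opportunity Insights:**\n"
--                           + "".join("  - " + i + "\n" for i in ins) + "\n")
--     return HEADER + "".join(blocks), table
-- ===== Notes on version B (the rewrite author's own statement) =====
-- stated objective: alternative
-- what changed: A scans each analysis line-by-line with a collect_insights flag (continue/break state machine) while accumulating one growing markdown string; B instead locates the two marker-line indices, slices the lines strictly between them and filters/cleans that slice, then assembles the output by joining independently built per-lesson blocks.
import Mathlib
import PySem

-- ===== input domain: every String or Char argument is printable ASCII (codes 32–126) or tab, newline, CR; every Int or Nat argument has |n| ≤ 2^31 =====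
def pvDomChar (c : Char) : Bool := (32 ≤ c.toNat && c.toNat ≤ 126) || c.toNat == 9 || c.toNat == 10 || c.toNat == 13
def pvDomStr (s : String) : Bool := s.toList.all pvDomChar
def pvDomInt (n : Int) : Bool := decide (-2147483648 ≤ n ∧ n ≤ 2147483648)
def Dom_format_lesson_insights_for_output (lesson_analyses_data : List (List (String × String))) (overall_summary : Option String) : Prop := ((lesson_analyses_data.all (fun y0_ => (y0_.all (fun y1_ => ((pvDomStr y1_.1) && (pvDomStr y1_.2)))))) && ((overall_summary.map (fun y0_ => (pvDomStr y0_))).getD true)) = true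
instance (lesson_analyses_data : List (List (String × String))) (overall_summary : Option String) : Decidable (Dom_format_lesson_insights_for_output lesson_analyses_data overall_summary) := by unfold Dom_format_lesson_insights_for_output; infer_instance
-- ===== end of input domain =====

-- B re-implements the insight extraction by locating the two marker-line indices and slicing/filtering
-- between them, and assembles the markdown by joining per-lesson blocks (objective: alternative decomposition).
-- Shared string literals of both programs:
def pvStrug : String := "Concepts or Topics Students are **Struggling** to Understand:"
def pvGood : String := "Concepts or Topics Students Seem to **Understand Well**:"
def pvHeader : String := "### Part 2: PRIORITIZED Lesson-Specific Opportunity Insights for Coaches\n\nThese insights are designed to be concise and immediately actionable for coaches, enhancing their support to students in specific lessons.\n\n"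
-- the identical .strip().replace('- ','').replace('* ','') chain both sources contain
def pvClean (line : String) : String :=
  PySem.Str.replace (PySem.Str.replace (PySem.Str.strip line) "- " "") "* " ""

-- ===== PORT A =====
-- A's stateful line loop: collect_insights flag, continue on the struggle marker, break on the understand marker
def aCollect : List String → Bool → List String
  | [], _ => []
  | line :: rest, collect =>
    if PySem.Str.isIn pvStrug line then aCollect rest true
    else if PySem.Str.isIn pvGood line then []
    else if collect && !(PySem.Str.strip line == "") && !(PySem.Str.startswith line "Examples:") then
      let insight := pvClean line
      if insight == "" then aCollect rest collect else insight :: aCollect rest collect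
    else aCollect rest collect

-- one iteration of A's outer for-loop (lesson_analysis['title'] / ['analysis'] raise KeyError when absent:
-- excluded by Pre_; the port skips such a lesson there)
def aLesson (acc : String × List (List (String × String))) (lesson : List (String × String)) :
    String × List (List (String × String)) :=
  match (PySem.Dict.ofList lesson).get? "title", (PySem.Dict.ofList lesson).get? "analysis" with
  | some title, some analysis =>
    let insights := aCollect (((PySem.Str.split? analysis "\n").getD [])) false
    if insights.isEmpty then acc
    else
      let top := insights.take 3
      let table := acc.2 ++ [[("Lesson Title", title),
        ("Opportunity Insights", PySem.Str.join "\n" (top.map (fun i => "- " ++ i)))]]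
      let t1 := acc.1 ++ "**Lesson Title:** " ++ title ++ "\n" ++ "- **Opportunity Insights:**\n"
      let t2 := top.foldl (fun t i => t ++ ("  - " ++ i ++ "\n")) t1
      (t2 ++ "\n", table)
  | _, _ => acc

def format_lesson_insights_for_output (lesson_analyses_data : List (List (String × String))) (overall_summary : Option String) : String × (List (List (String × String))) :=
  if lesson_analyses_data.isEmpty then ("No lesson-specific insights available.\n", [])
  else lesson_analyses_data.foldl aLesson (pvHeader, [])

-- ===== PORT B =====
-- B: index of the first line that stops collection (understand-marker line that is not a struggle-marker line)
def bStop (lines : List String) : Nat :=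
  (lines.findIdx? (fun l => PySem.Str.isIn pvGood l && !PySem.Str.isIn pvStrug l)).getD lines.length

-- B's insight extraction: slice strictly between the marker indices, filter, clean, take 3
def bInsights (analysis : String) : List String :=
  let lines := ((PySem.Str.split? analysis "\n").getD [])
  let pre := lines.take (bStop lines)            -- lines[:stop], stop ≥ 0: take is exact
  match pre.findIdx? (fun l => PySem.Str.isIn pvStrug l) with
  | none => []
  | some start =>
    let body := (pre.drop (start + 1)).filter (fun l =>
      !PySem.Str.isIn pvStrug l && !(PySem.Str.strip l == "") && !(PySem.Str.startswith l "Examples:"))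
    (((body.map pvClean).filter (fun c => !(c == ""))).take 3)

def bBlock (title : String) (ins : List String) : String :=
  "**Lesson Title:** " ++ title ++ "\n- **Opportunity Insights:**\n" ++
    PySem.Str.join "" (ins.map (fun i => "  - " ++ i ++ "\n")) ++ "\n"

def bRow (title : String) (ins : List String) : List (String × String) :=
  [("Lesson Title", title), ("Opportunity Insights", PySem.Str.join "\n" (ins.map (fun i => "- " ++ i)))]

def bStep (acc : List String × List (List (String × String))) (lesson : List (String × String)) :
    List String × List (List (String × String)) :=
  match (PySem.Dict.ofList lesson).get? "title", (PySem.Dict.ofList lesson).get? "analysis" with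
  | some title, some analysis =>
    let ins := bInsights analysis
    if ins.isEmpty then acc else (acc.1 ++ [bBlock title ins], acc.2 ++ [bRow title ins])
  | _, _ => acc

def format_lesson_insights_for_output_alt (lesson_analyses_data : List (List (String × String))) (overall_summary : Option String) : String × (List (List (String × String))) :=
  if lesson_analyses_data.isEmpty then ("No lesson-specific insights available.\n", [])
  else
    let r := lesson_analyses_data.foldl bStep ([], [])
    (pvHeader ++ PySem.Str.join "" r.1, r.2)

-- ===== PRECONDITION & SPEC =====
-- Pre_ excludes exactly the inputs where A raises KeyError: a lesson dict missing 'title' or 'analysis'.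
def Pre_format_lesson_insights_for_output (lesson_analyses_data : List (List (String × String))) (overall_summary : Option String) : Prop :=
  lesson_analyses_data.all (fun l => (PySem.Dict.ofList l).contains "title" && (PySem.Dict.ofList l).contains "analysis") = true
instance (lesson_analyses_data : List (List (String × String))) (overall_summary : Option String) : Decidable (Pre_format_lesson_insights_for_output lesson_analyses_data overall_summary) := by unfold Pre_format_lesson_insights_for_output; infer_instance
def pvWitness_format_lesson_insights_for_output : (List (List (String × String))) × Option String :=
  ([[("title", "Lesson 1"), ("analysis", "x")]], none)
def Spec_format_lesson_insights_for_output (lesson_analyses_data : List (List (String × String))) (overall_summary : Option String) (out : String × (List (List (String × String)))) : Prop := out = format_lesson_insights_for_output_alt lesson_analyses_data overall_summary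
instance (lesson_analyses_data : List (List (String × String))) (overall_summary : Option String) (out : String × (List (List (String × String)))) : Decidable (Spec_format_lesson_insights_for_output lesson_analyses_data overall_summary out) := by unfold Spec_format_lesson_insights_for_output; infer_instance

-- ===== CLAIM (what is proved, stated in full; the proofs are below) =====
def Claim_equal_format_lesson_insights_for_output : Prop := ∀ (lesson_analyses_data : List (List (String × String))) (overall_summary : Option String), Dom_format_lesson_insights_for_output lesson_analyses_data overall_summary → Pre_format_lesson_insights_for_output lesson_analyses_data overall_summary → Spec_format_lesson_insights_for_output lesson_analyses_data overall_summary (format_lesson_insights_for_output lesson_analyses_data overall_summary)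

-- ===== LEMMAS AND PROOFS =====

-- the filtered/cleaned lines B produces from a slice
def cleanAll (xs : List String) : List String :=
  ((xs.filter (fun l =>
      !PySem.Str.isIn pvStrug l && !(PySem.Str.strip l == "") && !(PySem.Str.startswith l "Examples:"))).map
    pvClean).filter (fun c => !(c == ""))

-- B's extraction without the final take 3
def fullB (lines : List String) : List String :=
  match (lines.take (bStop lines)).findIdx? (fun l => PySem.Str.isIn pvStrug l) with
  | none => []
  | some start => cleanAll ((lines.take (bStop lines)).drop (start + 1))

theorem bStop_cons_pos (l : String) (rest : List String)
    (h : (PySem.Str.isIn pvGood l && !PySem.Str.isIn pvStrug l) = true) :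
    bStop (l :: rest) = 0 := by
  unfold bStop
  rw [List.findIdx?_cons, if_pos h]
  rfl

theorem bStop_cons_neg (l : String) (rest : List String)
    (h : (PySem.Str.isIn pvGood l && !PySem.Str.isIn pvStrug l) = false) :
    bStop (l :: rest) = bStop rest + 1 := by
  unfold bStop
  rw [List.findIdx?_cons, if_neg (by simpa using h)]
  cases hf : rest.findIdx? (fun l => PySem.Str.isIn pvGood l && !PySem.Str.isIn pvStrug l) with
  | none => rfl
  | some i => rfl

theorem aCollect_cons (l : String) (rest : List String) (c : Bool) :
    aCollect (l :: rest) c =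
      if PySem.Str.isIn pvStrug l then aCollect rest true
      else if PySem.Str.isIn pvGood l then []
      else if c && !(PySem.Str.strip l == "") && !(PySem.Str.startswith l "Examples:") then
        (if pvClean l == "" then aCollect rest c else pvClean l :: aCollect rest c)
      else aCollect rest c := rfl

theorem cleanAll_cons (l : String) (xs : List String) :
    cleanAll (l :: xs) =
      if (!PySem.Str.isIn pvStrug l && !(PySem.Str.strip l == "") && !(PySem.Str.startswith l "Examples:")) = true then
        (if (pvClean l == "") = true then cleanAll xs else pvClean l :: cleanAll xs)
      else cleanAll xs := by
  unfold cleanAll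
  rw [List.filter_cons]
  by_cases hk : (!PySem.Str.isIn pvStrug l && !(PySem.Str.strip l == "") && !(PySem.Str.startswith l "Examples:")) = true
  · rw [if_pos hk, if_pos hk, List.map_cons, List.filter_cons]
    by_cases hc : (pvClean l == "") = true
    · rw [if_neg (by rw [hc]; decide), if_pos hc]
    · rw [if_pos (by rw [Bool.not_eq_true] at hc; rw [hc]; decide), if_neg hc]
  · rw [if_neg hk, if_neg hk]

theorem aCollect_true (lines : List String) :
    aCollect lines true = cleanAll (lines.take (bStop lines)) := by
  induction lines with
  | nil => rfl
  | cons l rest ih =>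
    rw [aCollect_cons]
    cases hs : PySem.Str.isIn pvStrug l with
    | true =>
      rw [if_pos rfl, bStop_cons_neg l rest (by rw [hs]; simp), List.take_succ_cons,
          cleanAll_cons, if_neg (by rw [hs]; simp)]
      exact ih
    | false =>
      rw [if_neg (by simp)]
      cases hg : PySem.Str.isIn pvGood l with
      | true =>
        rw [if_pos rfl, bStop_cons_pos l rest (by rw [hs, hg]; decide), List.take_zero]
        rfl
      | false =>
        rw [if_neg (by simp), bStop_cons_neg l rest (by rw [hg]; simp),
            List.take_succ_cons, cleanAll_cons]
        simp only [Bool.true_and, hs, Bool.not_false]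
        rw [ih]

theorem aCollect_false (lines : List String) :
    aCollect lines false = fullB lines := by
  induction lines with
  | nil => rfl
  | cons l rest ih =>
    rw [aCollect_cons]
    cases hs : PySem.Str.isIn pvStrug l with
    | true =>
      rw [if_pos rfl]
      unfold fullB
      rw [bStop_cons_neg l rest (by rw [hs]; simp), List.take_succ_cons, List.findIdx?_cons,
          if_pos hs]
      simp only [Nat.zero_add, List.drop_succ_cons, List.drop_zero]
      exact aCollect_true rest
    | false =>
      rw [if_neg (by simp)]
      cases hg : PySem.Str.isIn pvGood l with
      | true =>
        rw [if_pos rfl]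
        unfold fullB
        rw [bStop_cons_pos l rest (by rw [hs, hg]; decide), List.take_zero]
        rfl
      | false =>
        rw [if_neg (by simp), if_neg (by simp), ih]
        unfold fullB
        rw [bStop_cons_neg l rest (by rw [hg]; simp), List.take_succ_cons, List.findIdx?_cons,
            if_neg (by rw [hs]; simp)]
        cases hf : (rest.take (bStop rest)).findIdx? (fun l => PySem.Str.isIn pvStrug l) with
        | none => rfl
        | some i => simp only [Option.map_some, List.drop_succ_cons]

theorem bInsights_eq (analysis : String) :
    bInsights analysis = (aCollect (((PySem.Str.split? analysis "\n").getD [])) false).take 3 := by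
  rw [aCollect_false]
  simp only [bInsights, fullB]
  cases hf : ((((PySem.Str.split? analysis "\n").getD []).take
      (bStop ((PySem.Str.split? analysis "\n").getD []))).findIdx?
        (fun l => PySem.Str.isIn pvStrug l)) with
  | none => rfl
  | some i => rfl

theorem join_empty_cons (x : String) (xs : List String) :
    PySem.Str.join "" (x :: xs) = x ++ PySem.Str.join "" xs := by
  apply String.toList_inj.mp
  cases xs with
  | nil => simp [PySem.Chars.join_singleton, PySem.Chars.join_nil]
  | cons y ys => simp [PySem.Chars.join_cons_cons]

theorem join_empty_append (xs ys : List String) :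
    PySem.Str.join "" (xs ++ ys) = PySem.Str.join "" xs ++ PySem.Str.join "" ys := by
  induction xs with
  | nil =>
    apply String.toList_inj.mp
    simp [PySem.Chars.join_nil]
  | cons x xs ih =>
    rw [List.cons_append, join_empty_cons, join_empty_cons, ih, String.append_assoc]

theorem foldl_text (l : List String) (t : String) :
    List.foldl (fun t i => t ++ ("  - " ++ (i ++ "\n"))) t l
      = t ++ PySem.Str.join "" (l.map (fun i => "  - " ++ (i ++ "\n"))) := by
  induction l generalizing t with
  | nil =>
    apply String.toList_inj.mp
    simp [PySem.Chars.join_nil]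
  | cons x xs ih =>
    rw [List.foldl_cons, List.map_cons, join_empty_cons, ih, String.append_assoc]

theorem take_isEmpty (l : List String) : (l.take 3).isEmpty = l.isEmpty := by
  cases l <;> rfl

theorem join_empty_nil : PySem.Str.join "" [] = "" := rfl

theorem lit_merge (x : String) :
    ("\n" : String) ++ ("- **Opportunity Insights:**\n" ++ x)
      = "\n- **Opportunity Insights:**\n" ++ x := by
  rw [← String.append_assoc]
  rfl

theorem step_eq (t0 : String) (blocks0 : List String) (tab0 : List (List (String × String)))
    (lesson : List (String × String)) :
    aLesson (t0 ++ PySem.Str.join "" blocks0, tab0) lesson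
      = (t0 ++ PySem.Str.join "" (bStep (blocks0, tab0) lesson).1, (bStep (blocks0, tab0) lesson).2) := by
  cases h1 : (PySem.Dict.ofList lesson).get? "title" with
  | none => simp only [aLesson, bStep, h1]
  | some title =>
    cases h2 : (PySem.Dict.ofList lesson).get? "analysis" with
    | none => simp only [aLesson, bStep, h1, h2]
    | some analysis =>
      simp only [aLesson, bStep, h1, h2]
      have hins := bInsights_eq analysis
      have hemp : (bInsights analysis).isEmpty
          = (aCollect (((PySem.Str.split? analysis "\n").getD [])) false).isEmpty := by
        rw [hins, take_isEmpty]
      by_cases he : (aCollect (((PySem.Str.split? analysis "\n").getD [])) false).isEmpty = true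
      · rw [if_pos he, if_pos (by rw [hemp]; exact he)]
      · rw [if_neg he, if_neg (by rw [hemp]; exact he)]
        refine Prod.ext ?_ ?_
        · simp only [join_empty_append, join_empty_cons, join_empty_nil, bBlock,
            hins, String.append_empty, String.append_assoc]
          rw [foldl_text]
          simp only [String.append_assoc, lit_merge]
        · simp only [bRow, hins]

theorem fold_eq (data : List (List (String × String))) (t0 : String)
    (blocks0 : List String) (tab0 : List (List (String × String))) :
    data.foldl aLesson (t0 ++ PySem.Str.join "" blocks0, tab0)
      = (t0 ++ PySem.Str.join "" (data.foldl bStep (blocks0, tab0)).1, (data.foldl bStep (blocks0, tab0)).2) := by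
  induction data generalizing blocks0 tab0 with
  | nil => simp
  | cons lesson rest ih =>
    simp only [List.foldl_cons, step_eq]
    exact ih _ _

-- ===== VERDICT (by name: the statement is the Claim_ definition above) =====
theorem format_lesson_insights_for_output_spec : Claim_equal_format_lesson_insights_for_output := by
  intro data ov _ _
  unfold Spec_format_lesson_insights_for_output
  unfold format_lesson_insights_for_output format_lesson_insights_for_output_alt
  by_cases h : data.isEmpty = true
  · rw [if_pos h, if_pos h]
  · simp only [h, Bool.false_eq_true, if_false]
    have h0 : (pvHeader, ([] : List (List (String × String))))
        = (pvHeader ++ PySem.Str.join "" [], []) := by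
      rw [join_empty_nil, String.append_empty]
    rw [h0, fold_eq]
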